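-- pv_equiv track=rewrite | github.com/chochun/ALS | pathHandler.py | getPl
-- ===== SOURCE A (Python) =====
-- def getPl(paths):
--     pl = {}
--     for path in paths:
--         for e in path:
--             if e not in pl:
--                 pl[e] = []
--             if path not in pl[e]:
--                 pl[e].append(path)
--     return pl
-- ===== SOURCE B (Python) =====
-- def _dedup(xs):
--     out = []
--     for x in xs:
--         if x not in out:
--             out.append(x)
--     return out
--
--
-- def getPl(paths):
--     # Phase 1: distinct elements in first-seen order.
--     keys = []
--     for path in paths:
--         for e in path:
--             if e not in keys:
--                 keys.append(e)
--     # Phase 2: for each key, its paths are the dedup of the paths containing it.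
--     return {e: _dedup([p for p in paths if e in p]) for e in keys}
-- ===== Notes on version B (the rewrite author's own statement) =====
-- stated objective: alternative
-- what changed: A builds the dict incrementally in one pass, appending each path under each of its elements; B first collects the distinct elements in first-seen order, then builds the dict directly per key as the deduplicated filter of the paths containing that key.
import Mathlib
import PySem

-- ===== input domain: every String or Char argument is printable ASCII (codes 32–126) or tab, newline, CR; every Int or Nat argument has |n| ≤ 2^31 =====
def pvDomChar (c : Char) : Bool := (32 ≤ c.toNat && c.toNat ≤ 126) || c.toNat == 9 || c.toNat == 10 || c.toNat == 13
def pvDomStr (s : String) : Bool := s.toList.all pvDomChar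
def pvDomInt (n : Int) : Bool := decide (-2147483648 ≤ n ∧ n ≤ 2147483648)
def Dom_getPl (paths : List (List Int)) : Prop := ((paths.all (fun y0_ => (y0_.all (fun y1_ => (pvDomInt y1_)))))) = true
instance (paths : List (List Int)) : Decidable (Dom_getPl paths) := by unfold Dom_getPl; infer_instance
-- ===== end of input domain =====

-- B replaces A's single incremental dict-building pass by a key-collection pass followed by a
-- direct per-key construction (dedup of the filtered path list) — alternative decomposition, same result.

-- ===== PORT A =====
-- body of A's inner loop: ensure key e exists, then append `path` to pl[e] if absent
def stepA (path : List Int) (pl : PySem.Dict Int (List (List Int))) (e : Int) :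
    PySem.Dict Int (List (List Int)) :=
  let pl1 := if pl.contains e then pl else pl.insert e []
  if path ∈ pl1.getD e [] then pl1 else pl1.insert e (pl1.getD e [] ++ [path])

def getPl (paths : List (List Int)) : List (Int × List (List Int)) :=
  (paths.foldl (fun pl path => path.foldl (stepA path) pl) PySem.Dict.empty).items

-- ===== PORT B =====
-- _dedup: keep first occurrence, in order
def bDedup (xs : List (List Int)) : List (List Int) :=
  xs.foldl (fun out x => if x ∈ out then out else out ++ [x]) []

-- phase 1: distinct elements in first-seen order
def bKeys (paths : List (List Int)) : List Int :=
  paths.foldl (fun ks path => path.foldl (fun ks e => if e ∈ ks then ks else ks ++ [e]) ks) []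

def getPl_alt (paths : List (List Int)) : List (Int × List (List Int)) :=
  (bKeys paths).map (fun e => (e, bDedup (paths.filter (fun p => decide (e ∈ p)))))

-- ===== PRECONDITION & SPEC =====
def Spec_getPl (paths : List (List Int)) (out : List (Int × List (List Int))) : Prop := out = getPl_alt paths
instance (paths : List (List Int)) (out : List (Int × List (List Int))) : Decidable (Spec_getPl paths out) := by unfold Spec_getPl; infer_instance

-- ===== CLAIM (what is proved, stated in full; the proofs are below) =====
def Claim_equal_getPl : Prop := ∀ (paths : List (List Int)), Dom_getPl paths → Spec_getPl paths (getPl paths)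

-- ===== LEMMAS AND PROOFS =====

-- the value pl[e] ends up with in A, as a pure accumulator over the path list
def acc (e : Int) (v : List (List Int)) (ps : List (List Int)) : List (List Int) :=
  ps.foldl (fun v p => if e ∈ p ∧ p ∉ v then v ++ [p] else v) v

-- the key list both sides end up with, as a pure accumulator
def addK (ks : List Int) (e : Int) : List Int := if e ∈ ks then ks else ks ++ [e]

-- ---- generic items characterisation ----
theorem items_eq_map_getD (d : PySem.Dict Int (List (List Int))) (h : d.keys.Nodup) :
    d.items = d.keys.map (fun k => (k, d.getD k [])) := by
  have h1 : d.items.map (fun p => (p.1, d.getD p.1 [])) = d.items := by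
    conv_rhs => rw [show d.items = d.items.map id from (List.map_id _).symm]
    apply List.map_congr_left
    intro p hp
    have hmem : (p.1, p.2) ∈ d.items := by simpa using hp
    have := PySem.Dict.getD_of_mem_items (d := d) hmem h []
    simp [this]
  calc d.items = d.items.map (fun p => (p.1, d.getD p.1 [])) := h1.symm
    _ = d.keys.map (fun k => (k, d.getD k [])) := by
        simp [PySem.Dict.keys, List.map_map, Function.comp]

-- ---- A side ----
theorem getD_ensure (d : PySem.Dict Int (List (List Int))) (e x : Int) :
    (if d.contains e then d else d.insert e []).getD x [] = d.getD x [] := by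
  split
  · rfl
  · rename_i hc
    rw [PySem.Dict.getD_insert]
    split
    · rename_i hx; subst hx
      rw [PySem.Dict.getD_of_not_contains _ _ (by simpa using hc)]
    · rfl

theorem stepA_getD (p : List Int) (d : PySem.Dict Int (List (List Int))) (e x : Int) :
    (stepA p d e).getD x [] =
      if x = e ∧ p ∉ d.getD e [] then d.getD e [] ++ [p] else d.getD x [] := by
  unfold stepA
  have h1 : (if d.contains e then d else d.insert e []).getD x [] = d.getD x [] :=
    getD_ensure d e x
  simp only [getD_ensure d e e]
  split
  · rename_i hin
    rw [h1]
    by_cases hx : x = e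
    · subst hx; simp [hin]
    · simp [hx]
  · rename_i hnin
    rw [PySem.Dict.getD_insert]
    by_cases hx : x = e
    · subst hx; simp [hnin]
    · simp [hx, h1]

theorem stepA_keys (p : List Int) (d : PySem.Dict Int (List (List Int))) (e : Int) :
    (stepA p d e).keys = addK d.keys e := by
  unfold stepA addK
  have hc : d.contains e = decide (e ∈ d.keys) := PySem.Dict.contains_eq_decide_mem_keys d e
  by_cases he : e ∈ d.keys
  · have : d.contains e = true := by simp [hc, he]
    simp only [this, if_true, he, if_true]
    split
    · rfl
    · exact PySem.Dict.keys_insert_of_contains _ _ this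
  · have hcf : d.contains e = false := by simp [hc, he]
    simp only [hcf, Bool.false_eq_true, if_false, he, if_false]
    have hk1 : (d.insert e ([] : List (List Int))).keys = d.keys ++ [e] :=
      PySem.Dict.keys_insert_of_not_contains _ _ hcf
    split
    · exact hk1
    · rw [PySem.Dict.keys_insert_of_contains _ _ (PySem.Dict.contains_insert_self _ _ _), hk1]

theorem foldA_getD (p : List Int) (es : List Int) (d : PySem.Dict Int (List (List Int))) (x : Int) :
    (es.foldl (stepA p) d).getD x [] =
      if x ∈ es ∧ p ∉ d.getD x [] then d.getD x [] ++ [p] else d.getD x [] := by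
  induction es generalizing d with
  | nil => simp
  | cons e rest ih =>
    simp only [List.foldl_cons]
    rw [ih]
    by_cases hx : x = e
    · subst hx
      by_cases hp : p ∈ d.getD x []
      · have h1 : (stepA p d x).getD x [] = d.getD x [] := by rw [stepA_getD]; simp [hp]
        simp [h1, hp]
      · have h1 : (stepA p d x).getD x [] = d.getD x [] ++ [p] := by rw [stepA_getD]; simp [hp]
        simp [h1, hp]
    · have h1 : (stepA p d e).getD x [] = d.getD x [] := by rw [stepA_getD]; simp [hx]
      rw [h1]
      by_cases hr : x ∈ rest
      · simp [hr, hx]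
      · simp [hr, hx]

theorem foldA_keys (p : List Int) (es : List Int) (d : PySem.Dict Int (List (List Int))) :
    (es.foldl (stepA p) d).keys = es.foldl addK d.keys := by
  induction es generalizing d with
  | nil => rfl
  | cons e rest ih => simp only [List.foldl_cons, ih, stepA_keys]

theorem outerA_getD (ps : List (List Int)) (d : PySem.Dict Int (List (List Int))) (x : Int) :
    (ps.foldl (fun pl path => path.foldl (stepA path) pl) d).getD x [] =
      acc x (d.getD x []) ps := by
  induction ps generalizing d with
  | nil => rfl
  | cons p rest ih =>
    simp only [List.foldl_cons, acc, ih]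
    rw [foldA_getD]

theorem outerA_keys (ps : List (List Int)) (d : PySem.Dict Int (List (List Int))) :
    (ps.foldl (fun pl path => path.foldl (stepA path) pl) d).keys =
      ps.foldl (fun ks p => p.foldl addK ks) d.keys := by
  induction ps generalizing d with
  | nil => rfl
  | cons p rest ih => simp only [List.foldl_cons, ih, foldA_keys]

-- ---- B side ----
theorem bKeys_eq_foldl_addK (paths : List (List Int)) :
    bKeys paths = paths.foldl (fun ks p => p.foldl addK ks) [] := by
  unfold bKeys addK
  rfl

-- dedup of the filtered list equals A's accumulator
theorem dedup_filter_eq_acc (e : Int) (ps : List (List Int)) (v : List (List Int)) :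
    (ps.filter (fun p => decide (e ∈ p))).foldl
        (fun out x => if x ∈ out then out else out ++ [x]) v = acc e v ps := by
  induction ps generalizing v with
  | nil => rfl
  | cons p rest ih =>
    by_cases hp : e ∈ p
    · simp only [acc, List.foldl_cons, List.filter_cons, hp, decide_true, if_true]
      rw [ih]
      by_cases hv : p ∈ v
      · simp [acc, hv]
      · simp [acc, hv]
    · simp only [acc, List.foldl_cons, List.filter_cons, hp, decide_false, Bool.false_eq_true,
        if_false]
      rw [ih]
      simp [acc]

-- ---- nodup of the accumulated key list ----
theorem addK_nodup (ks : List Int) (e : Int) (h : ks.Nodup) : (addK ks e).Nodup := by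
  unfold addK
  split
  · exact h
  · rename_i he
    rw [List.nodup_append]
    refine ⟨h, List.nodup_singleton e, ?_⟩
    intro a ha b hb heq
    exact he ((heq.trans (List.mem_singleton.mp hb)) ▸ ha)

theorem foldl_addK_nodup (es : List Int) (ks : List Int) (h : ks.Nodup) :
    (es.foldl addK ks).Nodup := by
  induction es generalizing ks with
  | nil => exact h
  | cons e rest ih => exact ih _ (addK_nodup ks e h)

theorem keysOf_nodup (ps : List (List Int)) (ks : List Int) (h : ks.Nodup) :
    (ps.foldl (fun ks p => p.foldl addK ks) ks).Nodup := by
  induction ps generalizing ks with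
  | nil => exact h
  | cons p rest ih => exact ih _ (foldl_addK_nodup p ks h)

-- ===== VERDICT (by name: the statement is the Claim_ definition above) =====
theorem getPl_spec : Claim_equal_getPl := by
  intro paths _
  unfold Spec_getPl getPl getPl_alt
  set Afin := paths.foldl (fun pl path => path.foldl (stepA path) pl) PySem.Dict.empty with hA
  have hAkeys : Afin.keys = paths.foldl (fun ks p => p.foldl addK ks) [] := by
    rw [hA, outerA_keys]; simp [PySem.Dict.keys_empty]
  have hnodup : (paths.foldl (fun ks p => p.foldl addK ks) []).Nodup :=
    keysOf_nodup paths [] List.nodup_nil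
  rw [items_eq_map_getD Afin (by rw [hAkeys]; exact hnodup), hAkeys, bKeys_eq_foldl_addK]
  apply List.map_congr_left
  intro k hk
  have hAgetD : Afin.getD k [] = acc k [] paths := by
    rw [hA, outerA_getD]; simp [PySem.Dict.getD_empty]
  rw [hAgetD]
  unfold bDedup
  rw [dedup_filter_eq_acc]
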